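-- pv_equiv track=rewrite | github.com/FirmianaPlatform/SourceCode | Firmiana Frontend/gardener/silacQuant.py | get_ibaq_num
-- ===== SOURCE A (Python) =====
-- def get_ibaq_num(pro_seq):
--     length = len(pro_seq)
--     tmp_len = 0
--     ans = 0
--     for i in range(length):
--         tmp_len = tmp_len + 1
--         if pro_seq[i] == 'K' or pro_seq[i] == 'R':
--             if i == length - 1 or pro_seq[i + 1] != 'P':
--                 if tmp_len >= 7 and tmp_len <= 40:
--                     ans = ans + 1
--             tmp_len = 0
--     if ans == 0:
--         ans = 1
--     return ans
-- ===== SOURCE B (Python) =====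
-- def get_ibaq_num(pro_seq):
--     n = len(pro_seq)
--     sites = [i for i in range(n) if pro_seq[i] in ('K', 'R')]
--     starts = [0] + [s + 1 for s in sites[:-1]]
--     ans = sum(1 for s, st in zip(sites, starts)
--               if (s + 1 == n or pro_seq[s + 1] != 'P') and 7 <= s - st + 1 <= 40)
--     return ans or 1
-- ===== Notes on version B (the rewrite author's own statement) =====
-- stated objective: alternative
-- what changed: Replaced A's single-pass running-length state machine with a two-phase pipeline: first collect all cleavage-site indices (K/R), derive each peptide's start position from the previous site, then count valid (site,start) pairs with a sum over a zip.
import Mathlib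
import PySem

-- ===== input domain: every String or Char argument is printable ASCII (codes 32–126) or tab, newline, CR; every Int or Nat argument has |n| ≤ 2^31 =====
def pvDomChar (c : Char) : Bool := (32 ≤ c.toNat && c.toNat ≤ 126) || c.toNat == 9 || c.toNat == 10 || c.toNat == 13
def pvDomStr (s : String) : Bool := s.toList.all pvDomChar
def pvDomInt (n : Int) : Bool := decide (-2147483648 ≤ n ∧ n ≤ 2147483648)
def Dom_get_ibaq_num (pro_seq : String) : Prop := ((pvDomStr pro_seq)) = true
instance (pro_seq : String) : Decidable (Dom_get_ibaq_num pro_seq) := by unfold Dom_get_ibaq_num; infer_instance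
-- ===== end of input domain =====

-- B restructures A's one-pass counter state machine into a two-phase pipeline
-- (collect cleavage sites, then count valid site/start pairs); same cost, no speed claim.

-- ===== PORT A =====
-- literal transliteration: indexed for-loop over range(len), state (tmp_len, ans)
def get_ibaq_num (pro_seq : String) : Int :=
  let cs := pro_seq.toList
  let length := cs.length
  let st := (List.range length).foldl (fun (st : Int × Int) (i : Nat) =>
      if cs.getD i ' ' = 'K' ∨ cs.getD i ' ' = 'R' then
        (0, if i = length - 1 ∨ cs.getD (i + 1) ' ' ≠ 'P' then
              (if 7 ≤ st.1 + 1 ∧ st.1 + 1 ≤ 40 then st.2 + 1 else st.2)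
            else st.2)
      else (st.1 + 1, st.2)) (0, 0)
  if st.2 = 0 then 1 else st.2

-- ===== PORT B =====
-- literal transliteration of Source B: sites list, starts list (sites[:-1] → dropLast), sum over zip
def get_ibaq_num_alt (pro_seq : String) : Int :=
  let cs := pro_seq.toList
  let n := cs.length
  let sites := (List.range n).filter (fun i => decide (cs.getD i ' ' = 'K' ∨ cs.getD i ' ' = 'R'))
  let starts := 0 :: sites.dropLast.map (fun s => s + 1)
  let ans := (sites.zip starts).foldl
      (fun (a : Int) (p : Nat × Nat) =>
        if (p.1 + 1 = n ∨ cs.getD (p.1 + 1) ' ' ≠ 'P') ∧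
            (7 ≤ (p.1 : Int) - (p.2 : Int) + 1 ∧ (p.1 : Int) - (p.2 : Int) + 1 ≤ 40)
        then a + 1 else a) 0
  if ans = 0 then 1 else ans

-- ===== PRECONDITION & SPEC =====
def Spec_get_ibaq_num (pro_seq : String) (out : Int) : Prop := out = get_ibaq_num_alt pro_seq
instance (pro_seq : String) (out : Int) : Decidable (Spec_get_ibaq_num pro_seq out) := by unfold Spec_get_ibaq_num; infer_instance

-- ===== CLAIM (what is proved, stated in full; the proofs are below) =====
def Claim_equal_get_ibaq_num : Prop := ∀ (pro_seq : String), Dom_get_ibaq_num pro_seq → Spec_get_ibaq_num pro_seq (get_ibaq_num pro_seq)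

-- ===== LEMMAS AND PROOFS =====

-- common abstract count: peptides since last cut, with running length tmp
def pvCountA : List Char → Int → Int
  | [], _ => 0
  | c :: r, tmp =>
    if c = 'K' ∨ c = 'R' then
      (if r.headD ' ' ≠ 'P' ∧ (7 ≤ tmp + 1 ∧ tmp + 1 ≤ 40) then 1 else 0) + pvCountA r 0
    else pvCountA r (tmp + 1)

-- cleavage-site indices of a suffix starting at absolute offset o
def pvSites : List Char → Nat → List Nat
  | [], _ => []
  | c :: r, o => if c = 'K' ∨ c = 'R' then o :: pvSites r (o + 1) else pvSites r (o + 1)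

-- zip-count in recursive form (prev-start threaded)
def pvZ (cs : List Char) : List Nat → Nat → Int
  | [], _ => 0
  | s :: rest, st =>
    (if (s + 1 = cs.length ∨ cs.getD (s + 1) ' ' ≠ 'P') ∧
        (7 ≤ (s : Int) - (st : Int) + 1 ∧ (s : Int) - (st : Int) + 1 ≤ 40)
     then 1 else 0) + pvZ cs rest (s + 1)

theorem pv_getD_drop (full : List Char) (o : Nat) (c : Char) (r : List Char)
    (h : full.drop o = c :: r) : full.getD o ' ' = c := by
  have h0 : (full.drop o)[0]? = some c := by simp [h]
  rw [List.getElem?_drop] at h0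
  simp only [Nat.add_zero] at h0
  simp [List.getD, h0]

theorem pv_drop_succ (full : List Char) (o : Nat) (c : Char) (r : List Char)
    (h : full.drop o = c :: r) : full.drop (o + 1) = r := by
  have h1 : (full.drop o).drop 1 = r := by simp [h]
  rwa [List.drop_drop] at h1

theorem pv_len_drop (full : List Char) (o : Nat) (c : Char) (r : List Char)
    (h : full.drop o = c :: r) : full.length = o + 1 + r.length := by
  have h1 : full.length - o = r.length + 1 := by
    rw [← List.length_drop, h]; simp
  omega

-- the B-side lookahead disjunction reduces to the suffix head
theorem pv_look (full : List Char) (o : Nat) (c : Char) (r : List Char)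
    (h : full.drop o = c :: r) :
    ((o + 1 = full.length ∨ full.getD (o + 1) ' ' ≠ 'P') ↔ r.headD ' ' ≠ 'P') := by
  have hl := pv_len_drop full o c r h
  have hd := pv_drop_succ full o c r h
  cases r with
  | nil =>
    simp only [List.length_nil] at hl
    have hlen : o + 1 = full.length := by omega
    simp [hlen]
  | cons d r' =>
    have hgd : full.getD (o + 1) ' ' = d := pv_getD_drop full (o + 1) d r' hd
    have hne : ¬ (o + 1 = full.length) := by simp at hl ⊢; omega
    simp only [List.getD] at hgd
    simp [hgd, hne]

-- the A-side lookahead disjunction (i = length-1 form) reduces the same way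
theorem pv_lookA (full : List Char) (o : Nat) (c : Char) (r : List Char)
    (h : full.drop o = c :: r) :
    ((o = full.length - 1 ∨ full.getD (o + 1) ' ' ≠ 'P') ↔ r.headD ' ' ≠ 'P') := by
  have hl := pv_len_drop full o c r h
  rw [← pv_look full o c r h]
  constructor <;> rintro (h' | h')
  · left; omega
  · right; exact h'
  · left; omega
  · right; exact h'

theorem pv_range_shift (o m : Nat) :
    (List.range (m + 1)).map (fun j => o + j)
      = o :: (List.range m).map (fun j => (o + 1) + j) := by
  rw [List.range_succ_eq_map, List.map_cons, List.map_map]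
  refine congrArg₂ List.cons (by omega) ?_
  exact List.map_congr_left (fun j _ => by simp only [Function.comp_apply]; omega)

-- B bridge 1: the filtered range is pvSites
theorem pv_sites_eq (full : List Char) :
    ∀ (r : List Char) (o : Nat), full.drop o = r →
      ((List.range r.length).map (fun j => o + j)).filter
        (fun i => decide (full.getD i ' ' = 'K' ∨ full.getD i ' ' = 'R')) = pvSites r o := by
  intro r
  induction r with
  | nil => intro o _; simp [pvSites]
  | cons c rr ih =>
    intro o h
    have hc : full.getD o ' ' = c := pv_getD_drop full o c rr h
    have hd : full.drop (o + 1) = rr := pv_drop_succ full o c rr h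
    rw [List.length_cons, pv_range_shift, List.filter_cons]
    rw [ih (o + 1) hd]
    simp only [pvSites, hc]
    by_cases hkr : c = 'K' ∨ c = 'R' <;> simp [hkr]

-- B bridge 2: the zip fold computes pvZ
theorem pv_zipfold (full : List Char) :
    ∀ (sites : List Nat) (st : Nat) (acc : Int),
      (sites.zip (st :: sites.dropLast.map (fun s => s + 1))).foldl
        (fun (a : Int) (p : Nat × Nat) =>
          if (p.1 + 1 = full.length ∨ full.getD (p.1 + 1) ' ' ≠ 'P') ∧
              (7 ≤ (p.1 : Int) - (p.2 : Int) + 1 ∧ (p.1 : Int) - (p.2 : Int) + 1 ≤ 40)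
          then a + 1 else a) acc = acc + pvZ full sites st := by
  intro sites
  induction sites with
  | nil => intro st acc; simp [pvZ]
  | cons s rest ih =>
    intro st acc
    cases rest with
    | nil =>
      have key1 : (([s] : List Nat).zip (st :: ([s] : List Nat).dropLast.map (fun s => s + 1)))
          = [(s, st)] := rfl
      rw [key1, List.foldl_cons, List.foldl_nil]
      simp only [pvZ]
      split_ifs <;> ring
    | cons s2 r' =>
      have key : ((s :: s2 :: r').zip (st :: ((s :: s2 :: r').dropLast.map (fun s => s + 1))))
          = (s, st) :: ((s2 :: r').zip ((s + 1) :: ((s2 :: r').dropLast.map (fun s => s + 1)))) := rfl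
      rw [key, List.foldl_cons, ih (s + 1)]
      simp only [pvZ]
      split_ifs <;> ring

-- core: pvZ over pvSites equals pvCountA
theorem pv_main (full : List Char) :
    ∀ (r : List Char) (o st : Nat), full.drop o = r →
      pvZ full (pvSites r o) st = pvCountA r ((o : Int) - (st : Int)) := by
  intro r
  induction r with
  | nil => intro o st _; simp [pvSites, pvZ, pvCountA]
  | cons c rr ih =>
    intro o st h
    have hd : full.drop (o + 1) = rr := pv_drop_succ full o c rr h
    have hlook := pv_look full o c rr h
    by_cases hkr : c = 'K' ∨ c = 'R'
    · simp only [pvSites, hkr, if_true, pvZ, pvCountA]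
      rw [ih (o + 1) (o + 1) hd]
      have h2 : (((o + 1 : Nat) : Int) - ((o + 1 : Nat) : Int)) = 0 := by push_cast; ring
      rw [h2]
      congr 1
      simp only [hlook]
    · simp only [pvSites, hkr, if_false, pvCountA]
      rw [ih (o + 1) st hd]
      congr 1
      push_cast
      ring

-- A side: the indexed foldl computes pvCountA (final tmp_len existential)
theorem pv_foldA (full : List Char) :
    ∀ (r : List Char) (o : Nat) (tmp ans : Int), full.drop o = r →
      ∃ t, ((List.range r.length).map (fun j => o + j)).foldl
        (fun (st : Int × Int) (i : Nat) =>
          if full.getD i ' ' = 'K' ∨ full.getD i ' ' = 'R' then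
            (0, if i = full.length - 1 ∨ full.getD (i + 1) ' ' ≠ 'P' then
                  (if 7 ≤ st.1 + 1 ∧ st.1 + 1 ≤ 40 then st.2 + 1 else st.2)
                else st.2)
          else (st.1 + 1, st.2)) (tmp, ans) = (t, ans + pvCountA r tmp) := by
  intro r
  induction r with
  | nil => intro o tmp ans _; exact ⟨tmp, by simp [pvCountA]⟩
  | cons c rr ih =>
    intro o tmp ans h
    have hc : full.getD o ' ' = c := pv_getD_drop full o c rr h
    have hd : full.drop (o + 1) = rr := pv_drop_succ full o c rr h
    have hlook := pv_lookA full o c rr h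
    rw [List.length_cons, pv_range_shift, List.foldl_cons]
    by_cases hkr : c = 'K' ∨ c = 'R'
    · simp only [hc, hkr, if_true]
      obtain ⟨t, ht⟩ := ih (o + 1) 0
        (ans + (if rr.headD ' ' ≠ 'P' ∧ (7 ≤ tmp + 1 ∧ tmp + 1 ≤ 40) then 1 else 0)) hd
      refine ⟨t, ?_⟩
      simp only [pvCountA, hkr, if_true]
      rw [show ans + ((if rr.headD ' ' ≠ 'P' ∧ (7 ≤ tmp + 1 ∧ tmp + 1 ≤ 40) then (1:Int) else 0) + pvCountA rr 0)
            = (ans + (if rr.headD ' ' ≠ 'P' ∧ (7 ≤ tmp + 1 ∧ tmp + 1 ≤ 40) then (1:Int) else 0)) + pvCountA rr 0 by ring]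
      rw [← ht]
      congr 2
      rw [if_congr hlook rfl rfl]
      by_cases hl : rr.headD ' ' = 'P'
      · rw [if_neg (not_not_intro hl), if_neg (fun hx => hx.1 hl)]
        ring
      · rw [if_pos hl, if_congr (and_iff_right hl) rfl rfl]
        split_ifs <;> ring
    · simp only [hc, hkr, if_false]
      obtain ⟨t, ht⟩ := ih (o + 1) (tmp + 1) ans hd
      refine ⟨t, ?_⟩
      rw [ht]
      simp [pvCountA, hkr]

-- ===== VERDICT (by name: the statement is the Claim_ definition above) =====
theorem get_ibaq_num_spec : Claim_equal_get_ibaq_num := by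
  intro pro_seq _
  unfold Spec_get_ibaq_num get_ibaq_num get_ibaq_num_alt
  dsimp only
  have hdrop : pro_seq.toList.drop 0 = pro_seq.toList := by simp
  have hid : (List.range pro_seq.toList.length).map (fun j => 0 + j)
      = List.range pro_seq.toList.length := by
    simp
  obtain ⟨t, hA⟩ := pv_foldA pro_seq.toList pro_seq.toList 0 0 0 hdrop
  rw [hid] at hA
  have hS := pv_sites_eq pro_seq.toList pro_seq.toList 0 hdrop
  rw [hid] at hS
  have hZ := pv_zipfold pro_seq.toList (pvSites pro_seq.toList 0) 0 0
  have hM := pv_main pro_seq.toList pro_seq.toList 0 0 hdrop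
  rw [hA, hS, hZ, hM]
  norm_num
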